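-- pv_equiv track=rewrite | github.com/PiPiXia101/Chrome-python | lib/analysis_Xpath/plate_xpath.py | merge_elements
-- ===== SOURCE A (Python) =====
-- from typing import List, Dict, Any
--
-- def merge_elements(lst: List[str]) -> str:
--     """
--     将连续相同的字符合并为 "char+" 的形式表示一个或多个。
--     """
--     result = []
--     i = 0
--     while i < len(lst):
--         j = i + 1
--         while j < len(lst) and lst[j] == lst[i]:
--             j += 1
--         if j - i > 1:
--             result.append(f"{lst[i]}+")
--         else:
--             result.append(lst[i])
--         i = j
--     return ''.join(result)
-- ===== SOURCE B (Python) =====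
-- def merge_elements(lst):
--     n = len(lst)
--     return ''.join(
--         lst[i] + ("" if i == 0 or lst[i] != lst[i - 1] else "+")
--         for i in range(n)
--         if i == n - 1 or lst[i] != lst[i + 1]
--     )
-- ===== Notes on version B (the rewrite author's own statement) =====
-- stated objective: alternative
-- what changed: Replaces A's two-pointer run scanning (count each run, emit one piece per run) with a stateless pointwise characterization: one comprehension keeps exactly the indices that end a run (lst[i] != lst[i+1] or last) and appends '+' exactly when the index does not also start its run (lst[i] == lst[i-1]); no run lengths are ever computed.
import Mathlib
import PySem

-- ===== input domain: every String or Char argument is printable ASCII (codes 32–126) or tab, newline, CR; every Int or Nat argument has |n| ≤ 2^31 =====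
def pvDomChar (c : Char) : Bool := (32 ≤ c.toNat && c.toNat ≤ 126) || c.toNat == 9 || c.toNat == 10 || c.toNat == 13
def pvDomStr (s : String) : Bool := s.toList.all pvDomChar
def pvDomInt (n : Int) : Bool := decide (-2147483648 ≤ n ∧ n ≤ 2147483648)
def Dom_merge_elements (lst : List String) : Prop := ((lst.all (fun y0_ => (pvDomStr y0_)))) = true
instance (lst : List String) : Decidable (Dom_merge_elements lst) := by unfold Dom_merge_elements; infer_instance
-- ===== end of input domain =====

-- B replaces A's run-scanning two-pointer loop with a pointwise characterization:
-- each index is kept iff it ends a run, and gets "+" iff it does not also start one;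
-- no run lengths are ever counted (objective: alternative decomposition, same cost).


-- ===== PORT A =====
-- A's outer while loop over index i with the inner j-scan over the current run:
-- the inner 'while lst[j] == lst[i]' is the takeWhile prefix, and 'i = j'
-- continues after that prefix (drop).  fuel = elements left; it only guards
-- termination (each step consumes ≥ 1 element), the computation is exactly A's loop.
def pvMergeA : Nat → List String → List String
  | 0, _ => []
  | _, [] => []
  | fuel + 1, x :: xs =>
    let j := (xs.takeWhile (· == x)).length
    (if j + 1 > 1 then x ++ "+" else x) :: pvMergeA fuel (xs.drop j)

def merge_elements (lst : List String) : String :=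
  PySem.Str.join "" (pvMergeA lst.length lst)

-- ===== PORT B =====
-- the comprehension's filter: keep index i iff it is the last index or lst[i] != lst[i+1]
-- (all indexing is in range, so List.getD is exact for Python's lst[i] here)
def pvKeepB (lst : List String) (i : Nat) : Bool :=
  i == lst.length - 1 || lst.getD i "" != lst.getD (i + 1) ""

-- the comprehension's element: lst[i] plus "" if i == 0 or lst[i] != lst[i-1], else "+"
def pvPieceB (lst : List String) (i : Nat) : String :=
  lst.getD i "" ++ (if i == 0 || lst.getD i "" != lst.getD (i - 1) "" then "" else "+")

-- the generator over range(n) with its filter and element expression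
def pvPiecesB (lst : List String) : List String :=
  ((List.range lst.length).filter (pvKeepB lst)).map (pvPieceB lst)

def merge_elements_alt (lst : List String) : String :=
  PySem.Str.join "" (pvPiecesB lst)

-- ===== PRECONDITION & SPEC =====
def Spec_merge_elements (lst : List String) (out : String) : Prop := out = merge_elements_alt lst
instance (lst : List String) (out : String) : Decidable (Spec_merge_elements lst out) := by unfold Spec_merge_elements; infer_instance

-- ===== CLAIM (what is proved, stated in full; the proofs are below) =====
def Claim_equal_merge_elements : Prop := ∀ (lst : List String), Dom_merge_elements lst → Spec_merge_elements lst (merge_elements lst)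

-- ===== LEMMAS AND PROOFS =====

-- shift of the filter predicate: index i+1 in x::xs behaves like index i in xs
theorem pvKeepB_shift (x : String) (xs : List String) (i : Nat) (hi : i < xs.length) :
    pvKeepB (x :: xs) (i + 1) = pvKeepB xs i := by
  unfold pvKeepB
  simp only [List.getD_cons_succ, List.length_cons, Nat.add_sub_cancel]
  congr 1
  rw [Bool.eq_iff_iff]
  simp only [beq_iff_eq]
  omega

-- shift of the element expression, away from the first position
theorem pvPieceB_shift (x : String) (xs : List String) (i : Nat) (hi : 1 ≤ i) :
    pvPieceB (x :: xs) (i + 1) = pvPieceB xs i := by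
  obtain ⟨k, rfl⟩ : ∃ k, i = k + 1 := ⟨i - 1, by omega⟩
  unfold pvPieceB
  simp

-- peeling one element off the list shifts the filtered index range by one
theorem pvFilterRangeCons (g : Nat → String) (x : String) (xs : List String) :
    ((List.range (xs.length + 1)).filter (pvKeepB (x :: xs))).map g =
      (if pvKeepB (x :: xs) 0 then [g 0] else []) ++
        ((List.range xs.length).filter (pvKeepB xs)).map (fun i => g (i + 1)) := by
  rw [List.range_succ_eq_map, List.filter_cons, List.filter_map]
  have h2 : (List.range xs.length).filter (pvKeepB (x :: xs) ∘ Nat.succ)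
      = (List.range xs.length).filter (pvKeepB xs) := by
    apply List.filter_congr
    intro i hi
    simpa using pvKeepB_shift x xs i (List.mem_range.mp hi)
  rw [h2]
  split_ifs with h
  · simp [List.map_map, Function.comp, Nat.succ_eq_add_one]
  · simp [List.map_map, Function.comp, Nat.succ_eq_add_one]

theorem pvPiecesB_expand (x : String) (xs : List String) :
    pvPiecesB (x :: xs) =
      (if pvKeepB (x :: xs) 0 then [pvPieceB (x :: xs) 0] else []) ++
        ((List.range xs.length).filter (pvKeepB xs)).map (fun i => pvPieceB (x :: xs) (i + 1)) := by
  unfold pvPiecesB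
  exact pvFilterRangeCons (pvPieceB (x :: xs)) x xs

-- keeping index 0 of x::ys means the run of x's stops immediately
theorem pvKeep0_iff (x : String) (ys : List String) :
    pvKeepB (x :: ys) 0 = true ↔ (ys.takeWhile (· == x)).length = 0 := by
  cases ys with
  | nil => simp [pvKeepB]
  | cons z zs =>
    by_cases hz : z = x
    · subst hz
      simp [pvKeepB]
    · simp [pvKeepB, bne_iff_ne, Ne.symm hz, hz]

-- B's piece list on a cons splits off exactly the leading run's single piece.
theorem pvPiecesB_cons (x : String) (xs : List String) :
    pvPiecesB (x :: xs) =
      (if (xs.takeWhile (· == x)).length + 1 > 1 then x ++ "+" else x)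
        :: pvPiecesB (xs.drop (xs.takeWhile (· == x)).length) := by
  induction xs generalizing x with
  | nil => simp [pvPiecesB, pvKeepB, pvPieceB]
  | cons y ys ih =>
    by_cases hxy : y = x
    · -- the head continues the run
      subst hxy
      have htw : ((y :: ys).takeWhile (· == y)) = y :: ys.takeWhile (· == y) := by
        simp
      rw [htw]
      simp only [List.length_cons, List.drop_succ_cons]
      have hk0 : pvKeepB (y :: y :: ys) 0 = false := by
        simp [pvKeepB]
      rw [pvPiecesB_expand, hk0]
      simp only [Bool.false_eq_true, if_false, List.nil_append, List.length_cons]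
      rw [pvFilterRangeCons (fun i => pvPieceB (y :: y :: ys) (i + 1)) y ys]
      have hshift2 : ((List.range ys.length).filter (pvKeepB ys)).map
            (fun i => pvPieceB (y :: y :: ys) (i + 1 + 1))
          = ((List.range ys.length).filter (pvKeepB ys)).map (fun i => pvPieceB (y :: ys) (i + 1)) := by
        apply List.map_congr_left
        intro i _
        exact pvPieceB_shift y (y :: ys) (i + 1) (by omega)
      rw [hshift2]
      have hexp := pvPiecesB_expand y ys
      have hpi0 : pvPieceB (y :: ys) 0 = y := by simp [pvPieceB]
      have hpi1 : pvPieceB (y :: y :: ys) 1 = y ++ "+" := by simp [pvPieceB]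
      by_cases hk : pvKeepB (y :: ys) 0 = true
      · -- the run of y's has length exactly 2 here at the front of y::ys
        have ht0 : (ys.takeWhile (· == y)).length = 0 := (pvKeep0_iff y ys).mp hk
        rw [ih y] at hexp
        simp only [hk, if_true, hpi0, ht0, List.drop_zero, List.singleton_append,
          Nat.zero_add, gt_iff_lt, Nat.lt_irrefl, if_false] at hexp
        have htail := congrArg List.tail hexp
        simp only [List.tail_cons] at htail
        simp [hk, hpi1, ht0, htail]
      · have hkf : pvKeepB (y :: ys) 0 = false := by
          cases h : pvKeepB (y :: ys) 0 <;> simp_all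
        have ht1 : (ys.takeWhile (· == y)).length ≠ 0 := fun h =>
          hk ((pvKeep0_iff y ys).mpr h)
        rw [ih y] at hexp
        simp only [hkf, Bool.false_eq_true, if_false, List.nil_append] at hexp
        simp only [hkf, Bool.false_eq_true, if_false, List.nil_append]
        rw [← hexp]
        have h1 : (ys.takeWhile (· == y)).length + 1 > 1 := by omega
        have h2 : (ys.takeWhile (· == y)).length + 1 + 1 > 1 := by omega
        simp [h1, h2]
    · -- the head ends a run of length 1
      have htw : ((y :: ys).takeWhile (· == x)) = [] := by
        simp [hxy]
      rw [htw]
      simp only [List.length_nil, List.drop_zero]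
      rw [pvPiecesB_expand]
      have hk0 : pvKeepB (x :: y :: ys) 0 = true := by
        simp [pvKeepB, bne_iff_ne, Ne.symm hxy]
      rw [hk0, if_pos rfl]
      have hpi0 : pvPieceB (x :: y :: ys) 0 = x := by simp [pvPieceB]
      rw [hpi0]
      have hm : ((List.range (y :: ys).length).filter (pvKeepB (y :: ys))).map
            (fun i => pvPieceB (x :: y :: ys) (i + 1))
          = ((List.range (y :: ys).length).filter (pvKeepB (y :: ys))).map (pvPieceB (y :: ys)) := by
        apply List.map_congr_left
        intro i _
        rcases Nat.eq_zero_or_pos i with h0 | h1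
        · subst h0
          simp [pvPieceB, bne_iff_ne, hxy]
        · exact pvPieceB_shift x (y :: ys) i h1
      rw [hm]
      rfl

-- A's run-by-run output (given enough fuel) equals B's piece list.
theorem pvMergeA_eq_piecesB (fuel : Nat) (lst : List String) (h : lst.length ≤ fuel) :
    pvMergeA fuel lst = pvPiecesB lst := by
  induction fuel generalizing lst with
  | zero =>
    have : lst = [] := List.eq_nil_of_length_eq_zero (Nat.le_zero.mp h)
    subst this; rfl
  | succ fuel ih =>
    match lst with
    | [] => rfl
    | x :: xs =>
      rw [pvMergeA, pvPiecesB_cons]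
      congr 1
      exact ih _ (by simp only [List.length_drop, List.length_cons] at *; omega)

-- ===== VERDICT (by name: the statement is the Claim_ definition above) =====
theorem merge_elements_spec : Claim_equal_merge_elements := by
  intro lst _
  unfold Spec_merge_elements merge_elements merge_elements_alt
  rw [pvMergeA_eq_piecesB _ _ le_rfl]
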